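-- pv_equiv track=rewrite | github.com/starbc0720/Algorithm | 프로그래머스/0/120837. 개미 군단/개미 군단.py | solution
-- ===== SOURCE A (Python) =====
-- def solution(hp):
--     answer = 0
--
--     while hp > 0:
--         tmp_cnt = 0
--         if hp // 5 > 0:
--             tmp_cnt = hp // 5
--             hp = hp - (5 * tmp_cnt)
--         elif hp // 3 > 0:
--             tmp_cnt = hp // 3
--             hp = hp - (3 * tmp_cnt)
--         else:
--             answer = answer + hp
--             hp = 0
--
--         answer += tmp_cnt
--
--     return answer
-- ===== SOURCE B (Python) =====
-- def solution(hp):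
--     if hp <= 0:
--         return 0
--     return hp // 5 + hp % 5 // 3 + hp % 5 % 3
-- ===== Notes on version B (the rewrite author's own statement) =====
-- stated objective: simpler
-- what changed: Replaces the greedy while-loop that repeatedly strips the largest ant's multiples, then the next, then ones with a single closed-form arithmetic expression of floor-divisions and remainders, guarded by a non-positive-hp check returning zero.
import Mathlib
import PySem

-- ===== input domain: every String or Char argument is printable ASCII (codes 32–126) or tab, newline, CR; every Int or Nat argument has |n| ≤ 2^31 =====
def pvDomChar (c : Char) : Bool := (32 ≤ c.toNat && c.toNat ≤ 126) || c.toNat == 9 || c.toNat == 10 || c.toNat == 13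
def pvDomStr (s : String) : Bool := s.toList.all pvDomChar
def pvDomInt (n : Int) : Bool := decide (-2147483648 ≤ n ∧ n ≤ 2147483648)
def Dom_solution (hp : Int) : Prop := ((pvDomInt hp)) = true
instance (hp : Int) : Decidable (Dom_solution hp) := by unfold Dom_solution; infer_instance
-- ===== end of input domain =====

-- B replaces A's greedy while-loop with a single closed-form arithmetic expression (objective: simpler).

-- bridge lemmas (divisors 5 and 3 are positive, so Python // and % agree with Int ediv/emod);
-- cited by name in solutionLoop's decreasing_by, hence placed above the port
theorem pv_fd5 (a : Int) : PySem.Int.floordiv a 5 = a / 5 :=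
  PySem.Int.floordiv_eq_ediv_of_pos (by norm_num)
theorem pv_fd3 (a : Int) : PySem.Int.floordiv a 3 = a / 3 :=
  PySem.Int.floordiv_eq_ediv_of_pos (by norm_num)

-- ===== PORT A =====
-- the while-loop of A as structural recursion on the shrinking hp
def solutionLoop (hp answer : Int) : Int :=
  if _h : hp > 0 then
    if PySem.Int.floordiv hp 5 > 0 then
      let tmp_cnt := PySem.Int.floordiv hp 5
      solutionLoop (hp - 5 * tmp_cnt) (answer + tmp_cnt)
    else if PySem.Int.floordiv hp 3 > 0 then
      let tmp_cnt := PySem.Int.floordiv hp 3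
      solutionLoop (hp - 3 * tmp_cnt) (answer + tmp_cnt)
    else
      -- answer = answer + hp; hp = 0; tmp_cnt = 0; loop exits returning answer
      solutionLoop 0 (answer + hp)
  else
    answer
termination_by hp.toNat
decreasing_by
  · simp only [pv_fd5] at *; omega
  · simp only [pv_fd5, pv_fd3] at *; omega
  · simp only [pv_fd5, pv_fd3] at *; omega

def solution (hp : Int) : Int := solutionLoop hp 0

-- ===== PORT B =====
def solution_alt (hp : Int) : Int :=
  if hp ≤ 0 then 0
  else PySem.Int.floordiv hp 5
       + PySem.Int.floordiv (PySem.Int.mod hp 5) 3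
       + PySem.Int.mod (PySem.Int.mod hp 5) 3

-- ===== PRECONDITION & SPEC =====
def Spec_solution (hp : Int) (out : Int) : Prop := out = solution_alt hp
instance (hp : Int) (out : Int) : Decidable (Spec_solution hp out) := by unfold Spec_solution; infer_instance

-- ===== CLAIM (what is proved, stated in full; the proofs are below) =====
def Claim_equal_solution : Prop := ∀ (hp : Int), Dom_solution hp → Spec_solution hp (solution hp)

-- ===== LEMMAS AND PROOFS =====
theorem pv_md5 (a : Int) : PySem.Int.mod a 5 = a % 5 :=
  PySem.Int.mod_eq_emod_of_pos (by norm_num)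
theorem pv_md3 (a : Int) : PySem.Int.mod a 3 = a % 3 :=
  PySem.Int.mod_eq_emod_of_pos (by norm_num)
theorem solutionLoop_eq : ∀ (n : Nat) (hp answer : Int), hp.toNat = n →
    solutionLoop hp answer = answer + solution_alt hp := by
  intro n
  induction n using Nat.strong_induction_on with
  | _ n ih =>
    intro hp answer hn
    rw [solutionLoop]
    by_cases h : hp > 0
    · rw [dif_pos h]
      simp only [pv_fd5, pv_fd3]
      split_ifs with h5 h3
      · rw [ih (hp - 5 * (hp / 5)).toNat (by omega) _ _ rfl]
        simp only [solution_alt, pv_fd5, pv_fd3, pv_md5, pv_md3]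
        split_ifs <;> omega
      · rw [ih (hp - 3 * (hp / 3)).toNat (by omega) _ _ rfl]
        simp only [solution_alt, pv_fd5, pv_fd3, pv_md5, pv_md3]
        split_ifs <;> omega
      · rw [ih (0 : Int).toNat (by omega) _ _ rfl]
        simp only [solution_alt, pv_fd5, pv_fd3, pv_md5, pv_md3]
        split_ifs <;> omega
    · rw [dif_neg h]
      simp only [solution_alt]
      rw [if_pos (by omega : hp ≤ 0)]
      omega

-- ===== VERDICT (by name: the statement is the Claim_ definition above) =====
theorem solution_spec : Claim_equal_solution := by
  intro hp _
  unfold Spec_solution solution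
  rw [solutionLoop_eq hp.toNat hp 0 rfl]
  omega
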